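-- pv_equiv track=rewrite | github.com/shan-mathi/Codeforces | 1359B - New Theatre Square.py | white_pavement
-- ===== SOURCE A (Python) =====
-- def white_pavement(pav , x, y):
--     nx=0
--     ny=0
--
--     for i in pav:
--
--         sp = i.split('*')
--         for j in sp:
--             if len(j)%2==0:
--                 nx+= len(j)//2
--
--             else:
--                 nx += len(j) // 2
--                 ny+=1
--     return min((x*nx + y*ny), y*(2*nx + ny))
-- ===== SOURCE B (Python) =====
-- def white_pavement(pav, x, y):
--     # character-level scan: no split; count white tiles and odd-length runs directly
--     total = 0
--     ny = 0
--     for row in pav: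
--         parity = 0
--         for c in row:
--             if c == '*':
--                 ny += parity
--                 parity = 0
--             else:
--                 total += 1
--                 parity ^= 1
--         ny += parity
--     nx = (total - ny) // 2
--     return min(x * nx + y * ny, y * (2 * nx + ny))
-- ===== Notes on version B (the rewrite author's own statement) =====
-- stated objective: alternative
-- what changed: B never splits rows into segments: it scans each row character by character with a run-parity state machine (ny += parity at each '*' and at row end), totals white tiles, and derives the pair count nx = (total - ny) // 2 arithmetically instead of summing len//2 per segment with an even/odd branch.
import Mathlib
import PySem

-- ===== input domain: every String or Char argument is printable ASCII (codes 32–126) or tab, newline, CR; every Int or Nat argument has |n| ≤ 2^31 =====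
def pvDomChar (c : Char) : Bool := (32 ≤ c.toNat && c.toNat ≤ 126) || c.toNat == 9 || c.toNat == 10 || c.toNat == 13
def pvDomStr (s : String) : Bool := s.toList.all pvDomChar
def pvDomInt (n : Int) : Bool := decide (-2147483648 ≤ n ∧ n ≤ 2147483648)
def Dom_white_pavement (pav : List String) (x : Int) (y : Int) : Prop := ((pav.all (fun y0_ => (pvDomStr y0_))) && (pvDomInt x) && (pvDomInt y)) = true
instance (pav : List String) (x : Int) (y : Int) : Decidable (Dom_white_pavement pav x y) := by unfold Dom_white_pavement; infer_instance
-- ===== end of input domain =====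

-- B replaces A's split-into-segments pass by a character-level scan with a run-parity state machine (no split call, no even/odd branch; pair count derived arithmetically). Same cost; simpler data flow.


-- ===== PORT A =====
-- i.split('*') is exact as (split? i "*").getD [] since the separator is non-empty (split? is none only for sep = "")
def white_pavement (pav : List String) (x : Int) (y : Int) : Int :=
  let st := pav.foldl (fun (st : Int × Int) i =>
      let sp := (PySem.Str.split? i "*").getD []
      sp.foldl (fun (st : Int × Int) j =>
          if PySem.Int.mod (PySem.Str.len j) 2 == 0 then
            (st.1 + PySem.Int.floordiv (PySem.Str.len j) 2, st.2)
          else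
            (st.1 + PySem.Int.floordiv (PySem.Str.len j) 2, st.2 + 1)) st)
    (0, 0)
  min (x * st.1 + y * st.2) (y * (2 * st.1 + st.2))

-- ===== PORT B =====
-- state (total, ny, parity); 'parity ^= 1' is PySem.Int.bxor parity 1; after each row ny += parity
def white_pavement_alt (pav : List String) (x : Int) (y : Int) : Int :=
  let st := pav.foldl (fun (st : Int × Int) row =>
      let e := row.toList.foldl (fun (s : Int × Int × Int) c =>
          if c == '*' then (s.1, s.2.1 + s.2.2, 0)
          else (s.1 + 1, s.2.1, PySem.Int.bxor s.2.2 1)) (st.1, st.2, 0)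
      (e.1, e.2.1 + e.2.2)) (0, 0)
  let ny := st.2
  let nx := PySem.Int.floordiv (st.1 - ny) 2
  min (x * nx + y * ny) (y * (2 * nx + ny))

-- ===== PRECONDITION & SPEC =====
def Spec_white_pavement (pav : List String) (x : Int) (y : Int) (out : Int) : Prop := out = white_pavement_alt pav x y
instance (pav : List String) (x : Int) (y : Int) (out : Int) : Decidable (Spec_white_pavement pav x y out) := by unfold Spec_white_pavement; infer_instance

-- ===== CLAIM (what is proved, stated in full; the proofs are below) =====
def Claim_equal_white_pavement : Prop := ∀ (pav : List String) (x : Int) (y : Int), Dom_white_pavement pav x y → Spec_white_pavement pav x y (white_pavement pav x y)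

-- ===== LEMMAS AND PROOFS =====

-- recursive specification of splitting a char list on '*' (cur = reversed pending segment)
def pvSplit (cs : List Char) (cur : List Char) : List (List Char) :=
  match cs with
  | [] => [cur.reverse]
  | c :: rest => if c == '*' then cur.reverse :: pvSplit rest [] else pvSplit rest (c :: cur)

theorem pvGo_eq (fuel : Nat) : ∀ (l cur : List Char) (acc : List (List Char)),
    l.length < fuel →
    PySem.Chars.splitOn.go ['*'] fuel l cur acc = acc.reverse ++ pvSplit l cur := by
  induction fuel with
  | zero => intro l cur acc h; omega
  | succ n ih =>
    intro l cur acc h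
    cases l with
    | nil => simp [PySem.Chars.splitOn.go, pvSplit]
    | cons c rest =>
      by_cases hc : c = '*'
      · subst hc
        rw [show PySem.Chars.splitOn.go ['*'] (n+1) ('*' :: rest) cur acc
              = PySem.Chars.splitOn.go ['*'] n rest [] (cur.reverse :: acc) from by
            simp [PySem.Chars.splitOn.go, List.isPrefixOf]]
        rw [ih rest [] _ (by simpa using Nat.lt_of_succ_lt_succ h)]
        simp [pvSplit]
      · rw [show PySem.Chars.splitOn.go ['*'] (n+1) (c :: rest) cur acc
              = PySem.Chars.splitOn.go ['*'] n rest (c :: cur) acc from by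
            simp [PySem.Chars.splitOn.go, List.isPrefixOf]
            intro h'; exact absurd h'.symm hc]
        rw [ih rest (c :: cur) _ (by simpa using Nat.lt_of_succ_lt_succ h)]
        simp [pvSplit, hc]

theorem pvSplitOn_eq (cs : List Char) : PySem.Chars.splitOn cs ['*'] = pvSplit cs [] := by
  unfold PySem.Chars.splitOn
  rw [pvGo_eq (cs.length + 1) cs [] [] (by omega)]
  simp

-- A's segment step, both branches collapsed: add len/2 pairs and len%2 odds
theorem pvStepA (a : Int × Int) (j : List Char) :
    (if PySem.Int.mod (PySem.Str.len (String.ofList j)) 2 == 0 then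
      (a.1 + PySem.Int.floordiv (PySem.Str.len (String.ofList j)) 2, a.2)
    else
      (a.1 + PySem.Int.floordiv (PySem.Str.len (String.ofList j)) 2, a.2 + 1))
    = (a.1 + ((j.length / 2 : Nat) : Int), a.2 + ((j.length % 2 : Nat) : Int)) := by
  have hlen : PySem.Str.len (String.ofList j) = ((j.length : Nat) : Int) := by
    simp [PySem.Str.len_eq, String.toList_ofList]
  rw [hlen, PySem.Int.mod_eq_emod_of_pos (by norm_num), PySem.Int.floordiv_eq_ediv_of_pos (by norm_num)]
  split_ifs with h <;> simp only [beq_iff_eq] at h <;> simp only [Prod.mk.injEq] <;>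
    exact ⟨by omega, by omega⟩

-- the core invariant: B's per-character fold versus A's per-segment fold
theorem pvRow_rel (cs : List Char) : ∀ (cur : List Char) (a : Int × Int) (t o p : Int),
    t = 2 * a.1 + a.2 + cur.length → o = a.2 → p = ((cur.length % 2 : Nat) : Int) →
    (cs.foldl (fun (s : Int × Int × Int) c =>
        if c == '*' then (s.1, s.2.1 + s.2.2, 0)
        else (s.1 + 1, s.2.1, PySem.Int.bxor s.2.2 1)) (t, o, p)).1
      = 2 * ((pvSplit cs cur).foldl (fun (a : Int × Int) j =>
          (a.1 + ((j.length / 2 : Nat) : Int), a.2 + ((j.length % 2 : Nat) : Int))) a).1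
        + ((pvSplit cs cur).foldl (fun (a : Int × Int) j =>
          (a.1 + ((j.length / 2 : Nat) : Int), a.2 + ((j.length % 2 : Nat) : Int))) a).2
    ∧ (cs.foldl (fun (s : Int × Int × Int) c =>
        if c == '*' then (s.1, s.2.1 + s.2.2, 0)
        else (s.1 + 1, s.2.1, PySem.Int.bxor s.2.2 1)) (t, o, p)).2.1
      + (cs.foldl (fun (s : Int × Int × Int) c =>
        if c == '*' then (s.1, s.2.1 + s.2.2, 0)
        else (s.1 + 1, s.2.1, PySem.Int.bxor s.2.2 1)) (t, o, p)).2.2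
      = ((pvSplit cs cur).foldl (fun (a : Int × Int) j =>
          (a.1 + ((j.length / 2 : Nat) : Int), a.2 + ((j.length % 2 : Nat) : Int))) a).2 := by
  induction cs with
  | nil =>
    intro cur a t o p ht ho hp
    simp only [List.foldl_nil, pvSplit, List.foldl_cons, List.length_reverse]
    exact ⟨by omega, by omega⟩
  | cons c rest ih =>
    intro cur a t o p ht ho hp
    by_cases hc : c = '*'
    · subst hc
      simp only [List.foldl_cons, show (('*' : Char) == '*') = true from rfl, if_true]
      have := ih [] (a.1 + ((cur.length / 2 : Nat) : Int), a.2 + ((cur.length % 2 : Nat) : Int))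
        t (o + p) 0
        (by simp only [List.length_nil, Nat.cast_zero, add_zero]; omega)
        (by omega) (by simp)
      simpa [pvSplit] using this
    · simp only [List.foldl_cons, show ((c == '*')) = false from by simp [hc],
        Bool.false_eq_true, if_false]
      have := ih (c :: cur) a (t + 1) o (PySem.Int.bxor p 1)
        (by simp only [List.length_cons]; push_cast; omega)
        ho
        (by rcases Nat.mod_two_eq_zero_or_one cur.length with hm | hm
            · rw [hp, hm, List.length_cons, show (cur.length + 1) % 2 = 1 from by omega]
              decide
            · rw [hp, hm, List.length_cons, show (cur.length + 1) % 2 = 0 from by omega]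
              decide)
      simpa [pvSplit, hc] using this

theorem pvFloordiv_two_mul (n : Int) : PySem.Int.floordiv (2 * n) 2 = n := by
  have := PySem.Int.floordiv_eq_ediv_of_pos (a := 2 * n) (b := 2) (by omega)
  rw [this]; omega

theorem pvOuter_rel (pav : List String) : ∀ (a b : Int × Int),
    b.2 = a.2 → b.1 = 2 * a.1 + a.2 →
    (pav.foldl (fun (st : Int × Int) row =>
        let e := row.toList.foldl (fun (s : Int × Int × Int) c =>
            if c == '*' then (s.1, s.2.1 + s.2.2, 0)
            else (s.1 + 1, s.2.1, PySem.Int.bxor s.2.2 1)) (st.1, st.2, 0)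
        (e.1, e.2.1 + e.2.2)) b).2
      = (pav.foldl (fun (st : Int × Int) i =>
          ((PySem.Str.split? i "*").getD []).foldl (fun (st : Int × Int) j =>
            if PySem.Int.mod (PySem.Str.len j) 2 == 0 then
              (st.1 + PySem.Int.floordiv (PySem.Str.len j) 2, st.2)
            else
              (st.1 + PySem.Int.floordiv (PySem.Str.len j) 2, st.2 + 1)) st) a).2
    ∧ (pav.foldl (fun (st : Int × Int) row =>
        let e := row.toList.foldl (fun (s : Int × Int × Int) c =>
            if c == '*' then (s.1, s.2.1 + s.2.2, 0)
            else (s.1 + 1, s.2.1, PySem.Int.bxor s.2.2 1)) (st.1, st.2, 0)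
        (e.1, e.2.1 + e.2.2)) b).1
      = 2 * (pav.foldl (fun (st : Int × Int) i =>
          ((PySem.Str.split? i "*").getD []).foldl (fun (st : Int × Int) j =>
            if PySem.Int.mod (PySem.Str.len j) 2 == 0 then
              (st.1 + PySem.Int.floordiv (PySem.Str.len j) 2, st.2)
            else
              (st.1 + PySem.Int.floordiv (PySem.Str.len j) 2, st.2 + 1)) st) a).1
        + (pav.foldl (fun (st : Int × Int) i =>
          ((PySem.Str.split? i "*").getD []).foldl (fun (st : Int × Int) j =>
            if PySem.Int.mod (PySem.Str.len j) 2 == 0 then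
              (st.1 + PySem.Int.floordiv (PySem.Str.len j) 2, st.2)
            else
              (st.1 + PySem.Int.floordiv (PySem.Str.len j) 2, st.2 + 1)) st) a).2 := by
  induction pav with
  | nil => intro a b h1 h2; exact ⟨h1, h2⟩
  | cons r rest ih =>
    intro a b h1 h2
    simp only [List.foldl_cons]
    -- rewrite A's segment fold over this row into the pvSplit form
    have hsplit : (PySem.Str.split? r "*").getD []
        = (PySem.Chars.splitOn r.toList ['*']).map String.ofList := by
      simp [PySem.Str.split?, PySem.Chars.split?, show ("*" : String).toList = ['*'] from rfl]
    have hAseg : ((PySem.Str.split? r "*").getD []).foldl (fun (st : Int × Int) j =>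
          if PySem.Int.mod (PySem.Str.len j) 2 == 0 then
            (st.1 + PySem.Int.floordiv (PySem.Str.len j) 2, st.2)
          else
            (st.1 + PySem.Int.floordiv (PySem.Str.len j) 2, st.2 + 1)) a
        = (pvSplit r.toList []).foldl (fun (a : Int × Int) j =>
            (a.1 + ((j.length / 2 : Nat) : Int), a.2 + ((j.length % 2 : Nat) : Int))) a := by
      rw [hsplit, List.foldl_map, pvSplitOn_eq]
      exact PySem.List.foldl_congr_mem _ _ _ _ (fun a' j _ => pvStepA a' j)
    obtain ⟨g1, g2⟩ := pvRow_rel r.toList [] a b.1 b.2 0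
      (by simpa using h2) h1 (by simp)
    apply ih
    · dsimp only
      rw [hAseg]
      exact g2
    · dsimp only
      rw [hAseg]
      exact g1

-- ===== VERDICT (by name: the statement is the Claim_ definition above) =====
theorem white_pavement_spec : Claim_equal_white_pavement := by
  intro pav x y _
  unfold Spec_white_pavement white_pavement white_pavement_alt
  obtain ⟨h1, h2⟩ := pvOuter_rel pav (0, 0) (0, 0) rfl (by norm_num)
  simp only []
  rw [h1, h2]
  rw [show 2 * (pav.foldl _ ((0:Int),(0:Int))).1 + _ - _ = 2 * (pav.foldl (fun (st : Int × Int) i =>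
          ((PySem.Str.split? i "*").getD []).foldl (fun (st : Int × Int) j =>
            if PySem.Int.mod (PySem.Str.len j) 2 == 0 then
              (st.1 + PySem.Int.floordiv (PySem.Str.len j) 2, st.2)
            else
              (st.1 + PySem.Int.floordiv (PySem.Str.len j) 2, st.2 + 1)) st) ((0:Int),(0:Int))).1 from by ring]
  rw [pvFloordiv_two_mul]
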